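-- pv_equiv track=rewrite | github.com/epoyraz/leetcode | solutions/1940.py | getMaximumXor
-- ===== SOURCE A (Python) =====
-- def getMaximumXor(nums, maximumBit):
--     mask = (1 << maximumBit) - 1
--     total_xor = 0
--     for x in nums:
--         total_xor ^= x
--     n = len(nums)
--     ans = [0] * n
--     for i in range(n):
--         # at this step, total_xor is XOR of nums[0..n-1-i]
--         ans[i] = total_xor ^ mask
--         # remove the last element for next step
--         total_xor ^= nums[n-1-i]
--     return ans
-- ===== SOURCE B (Python) =====
-- def getMaximumXor(nums, maximumBit):
--     mask = (1 << maximumBit) - 1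
--     prefix = []
--     cur = 0
--     for x in nums:
--         cur ^= x
--         prefix.append(cur)
--     return [p ^ mask for p in reversed(prefix)]
-- ===== Notes on version B (the rewrite author's own statement) =====
-- stated objective: idiomatic
-- what changed: B builds the forward prefix-XOR table once and maps it in reverse ([p ^ mask for p in reversed(prefix)]), instead of A's compute-total-then-strip-the-tail loop that re-indexes nums[n-1-i] each step.
import Mathlib
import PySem

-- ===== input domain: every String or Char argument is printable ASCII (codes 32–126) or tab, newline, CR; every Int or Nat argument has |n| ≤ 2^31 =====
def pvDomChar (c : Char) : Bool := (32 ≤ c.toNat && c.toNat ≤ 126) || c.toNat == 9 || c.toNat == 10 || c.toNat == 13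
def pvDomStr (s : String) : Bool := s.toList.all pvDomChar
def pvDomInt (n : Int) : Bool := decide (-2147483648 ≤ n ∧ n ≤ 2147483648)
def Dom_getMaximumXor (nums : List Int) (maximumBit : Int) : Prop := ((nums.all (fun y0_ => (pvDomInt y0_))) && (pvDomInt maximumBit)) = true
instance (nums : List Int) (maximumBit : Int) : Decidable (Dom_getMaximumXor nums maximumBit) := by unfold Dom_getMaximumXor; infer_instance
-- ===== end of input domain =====

-- B replaces A's compute-total-then-strip-the-tail loop by a forward prefix-XOR table
-- mapped in reverse (objective: idiomatic decomposition). Return values only; no mutation.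

-- ===== PORT A =====
-- ans[i] written in index order i = 0,1,…,n-1 is modelled by appending; nums[n-1-i] is
-- always in range for i ∈ range(n), so the pyGetD default 0 is never used.
def getMaximumXor (nums : List Int) (maximumBit : Int) : List Int :=
  let mask : Int := (1 <<< maximumBit.toNat) - 1
  let total_xor : Int := nums.foldl (fun acc x => PySem.Int.bxor acc x) 0
  let n : Int := (nums.length : Int)
  ((PySem.List.pyRange 0 n 1).foldl
    (fun (st : Int × List Int) i =>
      (PySem.Int.bxor st.1 (PySem.List.pyGetD nums (n - 1 - i) 0),
       st.2 ++ [PySem.Int.bxor st.1 mask]))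
    (total_xor, [])).2

-- ===== PORT B =====
-- prefix list built by the accumulating loop of Source B
def pvAccXor : Int → List Int → List Int
  | _, [] => []
  | cur, x :: xs => PySem.Int.bxor cur x :: pvAccXor (PySem.Int.bxor cur x) xs

def getMaximumXor_alt (nums : List Int) (maximumBit : Int) : List Int :=
  let mask : Int := (1 <<< maximumBit.toNat) - 1
  (pvAccXor 0 nums).reverse.map (fun p => PySem.Int.bxor p mask)

-- ===== PRECONDITION & SPEC =====
-- Pre_ excludes negative maximumBit, where Python's '1 << maximumBit' raises ValueError.
def Pre_getMaximumXor (nums : List Int) (maximumBit : Int) : Prop := 0 ≤ maximumBit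
instance (nums : List Int) (maximumBit : Int) : Decidable (Pre_getMaximumXor nums maximumBit) := by unfold Pre_getMaximumXor; infer_instance
def pvWitness_getMaximumXor : List Int × Int := ([0, 1, 1, 3], 2)

def Spec_getMaximumXor (nums : List Int) (maximumBit : Int) (out : List Int) : Prop := out = getMaximumXor_alt nums maximumBit
instance (nums : List Int) (maximumBit : Int) (out : List Int) : Decidable (Spec_getMaximumXor nums maximumBit out) := by unfold Spec_getMaximumXor; infer_instance

-- ===== CLAIM (what is proved, stated in full; the proofs are below) =====
def Claim_equal_getMaximumXor : Prop := ∀ (nums : List Int) (maximumBit : Int), Dom_getMaximumXor nums maximumBit → Pre_getMaximumXor nums maximumBit → Spec_getMaximumXor nums maximumBit (getMaximumXor nums maximumBit)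

-- ===== LEMMAS AND PROOFS =====

-- constructor-wise description of PySem.Int.bxor
theorem bxor_ofNat_negSucc (m n : Nat) : PySem.Int.bxor (m : Int) (Int.negSucc n) = Int.negSucc (m ^^^ n) := by
  simp only [PySem.Int.bxor]
  have h1 : (0 : Int) ≤ (m : Int) := by positivity
  have h2 : ¬ (0 : Int) ≤ Int.negSucc n := by omega
  rw [if_pos h1, if_neg h2]
  have : (-(Int.negSucc n) - 1).toNat = n := by omega
  rw [this]
  have : ((m : Int)).toNat = m := by omega
  rw [this]
  omega

theorem bxor_negSucc_ofNat (m n : Nat) : PySem.Int.bxor (Int.negSucc m) (n : Int) = Int.negSucc (m ^^^ n) := by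
  simp only [PySem.Int.bxor]
  have h1 : ¬ (0 : Int) ≤ Int.negSucc m := by omega
  have h2 : (0 : Int) ≤ (n : Int) := by positivity
  rw [if_neg h1, if_pos h2]
  have : (-(Int.negSucc m) - 1).toNat = m := by omega
  rw [this]
  have : ((n : Int)).toNat = n := by omega
  rw [this]
  omega

theorem bxor_negSucc_negSucc (m n : Nat) : PySem.Int.bxor (Int.negSucc m) (Int.negSucc n) = ((m ^^^ n : Nat) : Int) := by
  simp only [PySem.Int.bxor]
  have h1 : ¬ (0 : Int) ≤ Int.negSucc m := by omega
  have h2 : ¬ (0 : Int) ≤ Int.negSucc n := by omega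
  rw [if_neg h1, if_neg h2]
  have e1 : (-(Int.negSucc m) - 1).toNat = m := by omega
  have e2 : (-(Int.negSucc n) - 1).toNat = n := by omega
  rw [e1, e2]

theorem bxor_assoc' (a b c : Int) : PySem.Int.bxor (PySem.Int.bxor a b) c = PySem.Int.bxor a (PySem.Int.bxor b c) := by
  cases a <;> cases b <;> cases c <;>
    simp [bxor_ofNat_negSucc, bxor_negSucc_ofNat, bxor_negSucc_negSucc, Nat.xor_assoc]

theorem bxor_cancel_right (a b : Int) : PySem.Int.bxor (PySem.Int.bxor a b) b = a := by
  rw [bxor_assoc', PySem.Int.bxor_self, PySem.Int.bxor_zero]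

-- pulling an element of the initial accumulator out of a xor-fold
theorem foldl_bxor_out (l : List Int) : ∀ (a x : Int),
    l.foldl (fun acc y => PySem.Int.bxor acc y) (PySem.Int.bxor a x)
      = PySem.Int.bxor (l.foldl (fun acc y => PySem.Int.bxor acc y) a) x := by
  induction l with
  | nil => intro a x; rfl
  | cons y t ih =>
    intro a x
    simp only [List.foldl_cons]
    have : PySem.Int.bxor (PySem.Int.bxor a x) y = PySem.Int.bxor (PySem.Int.bxor a y) x := by
      rw [bxor_assoc', bxor_assoc', PySem.Int.bxor_comm x y]
    rw [this, ih]

-- xor-fold is invariant under reversal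
theorem foldl_bxor_reverse (l : List Int) : ∀ (c : Int),
    l.reverse.foldl (fun acc y => PySem.Int.bxor acc y) c
      = l.foldl (fun acc y => PySem.Int.bxor acc y) c := by
  induction l with
  | nil => intro c; rfl
  | cons x t ih =>
    intro c
    simp only [List.reverse_cons, List.foldl_append, List.foldl_cons, List.foldl_nil, ih]
    rw [← foldl_bxor_out]

theorem pvAccXor_append (u v : List Int) : ∀ (c : Int),
    pvAccXor c (u ++ v) = pvAccXor c u ++ pvAccXor (u.foldl (fun acc y => PySem.Int.bxor acc y) c) v := by
  induction u with
  | nil => intro c; rfl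
  | cons x t ih =>
    intro c
    simp only [List.cons_append, pvAccXor, List.foldl_cons, ih]

-- the sequence of values A's second loop emits, as a recursion over the reversed list
def pvStrip (m : Int) : Int → List Int → List Int
  | _, [] => []
  | t, x :: xs => PySem.Int.bxor t m :: pvStrip m (PySem.Int.bxor t x) xs

theorem foldl_strip (m : Int) (r : List Int) : ∀ (t : Int) (a : List Int),
    (r.foldl (fun (st : Int × List Int) x =>
        (PySem.Int.bxor st.1 x, st.2 ++ [PySem.Int.bxor st.1 m])) (t, a)).2
      = a ++ pvStrip m t r := by
  induction r with
  | nil => intro t a; simp [pvStrip]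
  | cons x xs ih =>
    intro t a
    simp only [List.foldl_cons, pvStrip, ih]
    simp

theorem strip_eq_acc (m : Int) (r : List Int) : ∀ (c : Int),
    pvStrip m (r.foldl (fun acc y => PySem.Int.bxor acc y) c) r
      = (pvAccXor c r.reverse).reverse.map (fun p => PySem.Int.bxor p m) := by
  induction r with
  | nil => intro c; rfl
  | cons x xs ih =>
    intro c
    simp only [List.foldl_cons, List.reverse_cons]
    rw [pvAccXor_append, foldl_bxor_reverse]
    simp only [pvAccXor, List.reverse_append, List.reverse_cons, List.reverse_nil,
      List.nil_append, List.cons_append, List.map_cons]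
    have hT : xs.foldl (fun acc y => PySem.Int.bxor acc y) (PySem.Int.bxor c x)
        = PySem.Int.bxor (xs.foldl (fun acc y => PySem.Int.bxor acc y) c) x :=
      foldl_bxor_out xs c x
    simp only [pvStrip, hT]
    rw [bxor_cancel_right, ih]

-- ===== VERDICT (by name: the statement is the Claim_ definition above) =====
theorem getMaximumXor_spec : Claim_equal_getMaximumXor := by
  intro nums maximumBit _hdom _hpre
  unfold Spec_getMaximumXor
  simp only [getMaximumXor, getMaximumXor_alt]
  generalize (((1 <<< maximumBit.toNat : Nat) : Int) - 1) = M
  rw [PySem.List.foldl_congr_mem _ _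
      (fun (st : Int × List Int) i =>
        (PySem.Int.bxor st.1 (PySem.List.pyGetD nums.reverse i 0),
         st.2 ++ [PySem.Int.bxor st.1 M])) _
      (by
        intro st i hi
        rcases PySem.List.mem_pyRange_one.mp hi with ⟨h0, h1⟩
        have hlen : i < ((nums.reverse.length : Nat) : Int) := by simpa using h1
        have h1' : (nums.length : Int) - 1 - i < (nums.length : Int) := by omega
        have h0' : (0 : Int) ≤ (nums.length : Int) - 1 - i := by omega
        have hidx : ((nums.length : Int) - 1 - i).toNat = nums.length - 1 - i.toNat := by omega
        rw [PySem.List.pyGetD_eq_getElem nums 0 h0' h1']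
        simp only [PySem.List.pyGetD_eq_getElem nums.reverse 0 h0 hlen,
          List.getElem_reverse, hidx])]
  have hb : ((nums.length : Nat) : Int) = ((nums.reverse.length : Nat) : Int) := by simp
  rw [hb]
  rw [PySem.List.foldl_pyRange_zero_pyGetD' nums.reverse 0
      (fun (st : Int × List Int) x => (PySem.Int.bxor st.1 x, st.2 ++ [PySem.Int.bxor st.1 M]))
      (nums.foldl (fun acc x => PySem.Int.bxor acc x) 0, [])]
  rw [foldl_strip]
  simp only [List.nil_append]
  rw [← foldl_bxor_reverse nums 0]
  rw [strip_eq_acc M nums.reverse 0]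
  simp [List.reverse_reverse]
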